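-- pv_equiv track=rewrite | github.com/sdgandhi/Timesig | timesig.py | printBar16
-- ===== SOURCE A (Python) =====
-- def printBar16(curBeat):
-- 	if curBeat == 0:
-- 		return "| | | | | | | | | | | | | | | | |"
-- 	if curBeat%16 == 0:
-- 		return '| | | | | | | | | | | | | | | |X|'
-- 	returnStr = []
-- 	returnStr.append('|')
-- 	for i in range(0,curBeat%16-1):
-- 		returnStr.append(' |')
-- 	else:
-- 		returnStr.append('X|')
-- 	for i in range(0,16 - (curBeat%16)):
-- 		if curBeat%16 == 0:
-- 			break
-- 		returnStr.append(' |')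
--
-- 	return ''.join(returnStr)
-- ===== SOURCE B (Python) =====
-- def printBar16(curBeat):
--     pos = curBeat % 16
--     cells = [' '] * 16
--     if curBeat != 0:
--         cells[15 if pos == 0 else pos - 1] = 'X'
--     return '|' + ''.join(c + '|' for c in cells)
-- ===== Notes on version B (the rewrite author's own statement) =====
-- stated objective: simpler
-- what changed: Replaces A's three-way branch with hard-coded strings plus two bounded append loops by a single index computation: build a 16-cell list of spaces, place one 'X' at the computed index, and join once.
import Mathlib
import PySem

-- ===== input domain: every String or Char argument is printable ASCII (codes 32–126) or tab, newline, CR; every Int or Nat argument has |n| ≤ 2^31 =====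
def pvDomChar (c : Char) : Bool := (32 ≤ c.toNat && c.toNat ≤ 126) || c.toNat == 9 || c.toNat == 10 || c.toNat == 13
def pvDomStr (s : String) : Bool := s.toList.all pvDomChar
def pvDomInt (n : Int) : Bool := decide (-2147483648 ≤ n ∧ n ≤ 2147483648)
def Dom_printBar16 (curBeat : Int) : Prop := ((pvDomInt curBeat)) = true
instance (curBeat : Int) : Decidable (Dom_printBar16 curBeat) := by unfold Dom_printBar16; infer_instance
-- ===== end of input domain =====

-- B: one index computation + single cell assignment instead of A's three-way branch and two loops (simpler; equal cost).

-- ===== PORT A =====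
def printBar16 (curBeat : Int) : String :=
  if curBeat == 0 then "| | | | | | | | | | | | | | | | |"
  else if PySem.Int.mod curBeat 16 == 0 then "| | | | | | | | | | | | | | | |X|"
  else
    let returnStr : List String := ["|"]
    -- for i in range(0, curBeat%16-1): append(' |')  … else: append('X|')  (for-else: else runs after the loop)
    let returnStr := (PySem.List.pyRange 0 (PySem.Int.mod curBeat 16 - 1) 1).foldl
      (fun acc _ => acc ++ [" |"]) returnStr
    let returnStr := returnStr ++ ["X|"]
    -- second loop with its (never-taken here) break, ported with an explicit broken flag
    let st := (PySem.List.pyRange 0 (16 - PySem.Int.mod curBeat 16) 1).foldl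
      (fun (st : List String × Bool) _ =>
        if st.2 then st
        else if PySem.Int.mod curBeat 16 == 0 then (st.1, true)
        else (st.1 ++ [" |"], st.2)) (returnStr, false)
    PySem.Str.join "" st.1

-- ===== PORT B =====
def printBar16_alt (curBeat : Int) : String :=
  let pos := PySem.Int.mod curBeat 16
  let cells : List String := List.replicate 16 " "
  let cells := if curBeat == 0 then cells
    else cells.set (if pos == 0 then 15 else (pos - 1).toNat) "X"
  "|" ++ PySem.Str.join "" (cells.map (fun c => c ++ "|"))

-- ===== PRECONDITION & SPEC =====
def Spec_printBar16 (curBeat : Int) (out : String) : Prop := out = printBar16_alt curBeat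
instance (curBeat : Int) (out : String) : Decidable (Spec_printBar16 curBeat out) := by unfold Spec_printBar16; infer_instance

-- ===== CLAIM (what is proved, stated in full; the proofs are below) =====
def Claim_equal_printBar16 : Prop := ∀ (curBeat : Int), Dom_printBar16 curBeat → Spec_printBar16 curBeat (printBar16 curBeat)

-- ===== LEMMAS AND PROOFS =====

-- ===== VERDICT (by name: the statement is the Claim_ definition above) =====
-- both ports depend on curBeat only through (curBeat == 0) and curBeat % 16; with
-- curBeat ≠ 0 we generalize the residue and check the 16 cases by evaluation
theorem agree_of_ne_zero (c : Int) (hc : ¬ c = 0) : printBar16 c = printBar16_alt c := by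
  have h0 : (0:Int) ≤ PySem.Int.mod c 16 := PySem.Int.mod_nonneg c (by norm_num)
  have h1 : PySem.Int.mod c 16 < 16 := PySem.Int.mod_lt c (by norm_num)
  unfold printBar16 printBar16_alt
  simp only [beq_iff_eq, hc, if_false]
  generalize PySem.Int.mod c 16 = p at h0 h1
  interval_cases p <;> decide

theorem printBar16_spec : Claim_equal_printBar16 := by
  intro c _
  unfold Spec_printBar16
  by_cases hc : c = 0
  · subst hc; decide
  · exact (agree_of_ne_zero c hc)
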